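-- pv_equiv track=rewrite | github.com/pypi-data/pypi-mirror-370 | packages/abvelocity/abvelocity-0.1.0-py3-none-any.whl/abvelocity/utils/gen_tuples_with_replacement.py | gen_tuples_with_replacement
-- ===== SOURCE A (Python) =====
-- from itertools import product
--
-- def gen_tuples_with_replacement(original_tuple: tuple, replacement: any) -> list[tuple]:
--     """
--     Generate all possible tuples by replacing any element of the original tuple
--     with a constant replacement value, including the original tuple but excluding the tuple where all elements are the replacement value.
--
--     Args:
--         original_tuple: The original tuple of elements.
--         replacement: The value to replace elements with.
--
--     Returns:
--         list[tuple]: A list of tuples with each possible combination of elements replaced by the replacement value.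
--     """
--     n = len(original_tuple)
--     # Generate all combinations of True/False of length n
--     all_combinations = list(product([True, False], repeat=n))
--
--     generated_tuples = []
--
--     for combination in all_combinations:
--         # Create a new tuple based on the combination
--         new_tuple = tuple(replacement if combination[i] else original_tuple[i] for i in range(n))
--         # Add the new tuple to the generated_tuples list
--         generated_tuples.append(new_tuple)
--
--     # Remove the tuple where all elements are the replacement value
--     all_replacement_tuple = (replacement,) * n
--     if all_replacement_tuple in generated_tuples:
--         generated_tuples.remove(all_replacement_tuple)
--
--     # Assert the size of the generated_tuples list
--     expected_size = (2**n) - 1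
--     assert (
--         len(generated_tuples) == expected_size
--     ), f"Expected size {expected_size}, but got {len(generated_tuples)}"
--
--     return generated_tuples
-- ===== SOURCE B (Python) =====
-- def gen_tuples_with_replacement(original_tuple: tuple, replacement: any) -> list[tuple]:
--     """Recursive enumeration: for each position choose replacement first, then the
--     original element; the first generated tuple is the all-replacement one, so the
--     result is the full list minus its head."""
--     def rec(t):
--         if not t:
--             return [()]
--         suffixes = rec(t[1:])
--         return [(replacement,) + s for s in suffixes] + [(t[0],) + s for s in suffixes]
--     return rec(original_tuple)[1:]
-- ===== Notes on version B (the rewrite author's own statement) =====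
-- stated objective: simpler
-- what changed: Replaces the itertools.product-over-boolean-masks loop plus membership test and list.remove with a direct recursive enumeration over the tuple suffix (replacement branch first, then the original element), so the all-replacement tuple is provably the head of the generated list and is dropped by a single [1:] slice.
import Mathlib
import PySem

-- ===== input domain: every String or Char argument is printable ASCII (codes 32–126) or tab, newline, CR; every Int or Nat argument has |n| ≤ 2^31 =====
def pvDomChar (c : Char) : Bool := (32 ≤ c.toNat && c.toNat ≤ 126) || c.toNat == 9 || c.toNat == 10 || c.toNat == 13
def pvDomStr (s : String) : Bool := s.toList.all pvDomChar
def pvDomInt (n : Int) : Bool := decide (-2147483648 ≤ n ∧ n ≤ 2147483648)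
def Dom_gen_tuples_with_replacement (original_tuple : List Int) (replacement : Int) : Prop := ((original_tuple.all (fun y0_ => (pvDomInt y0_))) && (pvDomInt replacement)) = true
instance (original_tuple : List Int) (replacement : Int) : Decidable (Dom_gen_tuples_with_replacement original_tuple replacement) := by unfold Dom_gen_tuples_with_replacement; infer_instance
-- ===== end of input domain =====

-- B replaces A's product-over-boolean-masks + membership/remove with a recursive
-- suffix enumeration whose head is the all-replacement tuple, dropped by one slice (objective: simpler).

-- ===== PORT A =====
-- list(product([True, False], repeat=n)): the first coordinate varies slowest
def pvProductTF : Nat → List (List Bool)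
  | 0 => [[]]
  | n+1 => [true, false].flatMap (fun b => (pvProductTF n).map (b :: ·))

def gen_tuples_with_replacement (original_tuple : List Int) (replacement : Int) : List (List Int) :=
  let n := original_tuple.length
  let all_combinations := pvProductTF n
  -- for combination in all_combinations: append tuple(replacement if combination[i] else original_tuple[i] for i in range(n))
  -- (both indexings use i in range(n), always in range; getD's defaults are never used)
  let generated_tuples := all_combinations.foldl (fun acc combination =>
      acc ++ [(List.range n).map (fun i =>
        if combination.getD i false then replacement else original_tuple.getD i 0)]) []
  let all_replacement_tuple := List.replicate n replacement
  -- if all_replacement_tuple in generated_tuples: generated_tuples.remove(all_replacement_tuple)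
  let generated_tuples :=
    if all_replacement_tuple ∈ generated_tuples then
      (PySem.List.remove? generated_tuples all_replacement_tuple).getD generated_tuples
    else generated_tuples
  -- the assert len == 2**n - 1 always succeeds: exactly one tuple was removed
  generated_tuples

-- ===== PORT B =====
def pvRecB (replacement : Int) : List Int → List (List Int)
  | [] => [[]]
  | x :: rest =>
    let suffixes := pvRecB replacement rest
    suffixes.map (replacement :: ·) ++ suffixes.map (x :: ·)

def gen_tuples_with_replacement_alt (original_tuple : List Int) (replacement : Int) : List (List Int) :=
  (pvRecB replacement original_tuple).drop 1

-- ===== PRECONDITION & SPEC =====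
def Spec_gen_tuples_with_replacement (original_tuple : List Int) (replacement : Int) (out : List (List Int)) : Prop := out = gen_tuples_with_replacement_alt original_tuple replacement
instance (original_tuple : List Int) (replacement : Int) (out : List (List Int)) : Decidable (Spec_gen_tuples_with_replacement original_tuple replacement out) := by unfold Spec_gen_tuples_with_replacement; infer_instance

-- ===== CLAIM (what is proved, stated in full; the proofs are below) =====
def Claim_equal_gen_tuples_with_replacement : Prop := ∀ (original_tuple : List Int) (replacement : Int), Dom_gen_tuples_with_replacement original_tuple replacement → Spec_gen_tuples_with_replacement original_tuple replacement (gen_tuples_with_replacement original_tuple replacement)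

-- ===== LEMMAS AND PROOFS =====

-- A's indexed comprehension over range(n) equals a zipWith over mask and tuple
theorem pv_build_eq_zipWith (r : Int) : ∀ (o : List Int) (c : List Bool), c.length = o.length →
    (List.range o.length).map (fun i => if c.getD i false then r else o.getD i 0)
      = List.zipWith (fun b x => if b then r else x) c o := by
  intro o
  induction o with
  | nil => intro c h; simp
  | cons x rest ih =>
    intro c h
    cases c with
    | nil => simp at h
    | cons b c' =>
      simp only [List.length_cons, List.range_succ_eq_map, List.map_cons, List.map_map]
      simp only [List.getD_cons_zero, List.zipWith_cons_cons]
      congr 1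
      · have := ih c' (by simpa using h)
        simpa [Function.comp] using this

-- mapping A's builder over all boolean masks is exactly B's recursive enumeration
theorem pv_product_map_eq_rec (r : Int) : ∀ (o : List Int),
    (pvProductTF o.length).map (fun c => List.zipWith (fun b x => if b then r else x) c o)
      = pvRecB r o := by
  intro o
  induction o with
  | nil => simp [pvProductTF, pvRecB]
  | cons x rest ih =>
    simp only [List.length_cons, pvProductTF, pvRecB, List.flatMap_cons, List.flatMap_nil,
      List.map_append, List.map_map, List.append_nil]
    congr 1 <;> (rw [← ih, List.map_map]; rfl)

-- B's full list starts with the all-replacement tuple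
theorem pv_rec_head (r : Int) : ∀ (o : List Int),
    pvRecB r o = List.replicate o.length r :: (pvRecB r o).drop 1 := by
  intro o
  induction o with
  | nil => rfl
  | cons x rest ih =>
    simp only [pvRecB, List.length_cons, List.replicate_succ]
    rw [ih]
    simp

-- ===== VERDICT (by name: the statement is the Claim_ definition above) =====
theorem gen_tuples_with_replacement_spec : Claim_equal_gen_tuples_with_replacement := by
  intro o r _
  unfold Spec_gen_tuples_with_replacement gen_tuples_with_replacement gen_tuples_with_replacement_alt
  simp only []
  have hfold : (pvProductTF o.length).foldl (fun acc combination =>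
      acc ++ [(List.range o.length).map (fun i =>
        if combination.getD i false then r else o.getD i 0)]) []
      = (pvProductTF o.length).map (fun combination => (List.range o.length).map (fun i =>
        if combination.getD i false then r else o.getD i 0)) := by
    rw [PySem.List.foldl_append_singleton_eq_map]; simp
  have hlen : ∀ c ∈ pvProductTF o.length, c.length = o.length := by
    generalize o.length = n
    induction n with
    | zero => intro c hc; simp [pvProductTF] at hc; simp [hc]
    | succ m ih =>
      intro c hc
      simp only [pvProductTF, List.mem_flatMap, List.mem_map] at hc
      obtain ⟨b, _, c', hc', rfl⟩ := hc
      simp [ih c' hc']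
  have hmap : (pvProductTF o.length).map (fun combination => (List.range o.length).map (fun i =>
        if combination.getD i false then r else o.getD i 0)) = pvRecB r o := by
    rw [← pv_product_map_eq_rec r o]
    exact List.map_congr_left (fun c hc => pv_build_eq_zipWith r o c (hlen c hc))
  rw [hfold, hmap]
  rw [pv_rec_head r o]
  simp [PySem.List.remove?_cons_self]
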